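-- pv_equiv track=rewrite | github.com/AnEpicDoor/Data-Structures-and-Algorithms | main.py | algorithm_d
-- ===== SOURCE A (Python) =====
-- def algorithm_d(array):
--
--     # initialise empty subsets
--     s1 = []
--     s2 = []
--
--     # append first element to subset 1, append second element to subset 2
--     s1.append(array[0])
--     s2.append(array[1])
--
--     # loop through the rest of the elements
--     for i in range(2, len(array)):
--
--         if sum(s1) <= sum(s2):
--             # if sum of subset 1 is less than or equal to subset 2 then append to subset 1
--             s1.append(array[i])
--         else:
--             # else append to subset 2
--             s2.append(array[i])
--
--     # return subsets
--     return s1, s2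
-- ===== SOURCE B (Python) =====
-- def algorithm_d(array):
--     s1, s2 = [array[0]], [array[1]]
--     t1, t2 = array[0], array[1]
--     for x in array[2:]:
--         if t1 <= t2:
--             s1.append(x)
--             t1 += x
--         else:
--             s2.append(x)
--             t2 += x
--     return s1, s2
-- ===== Notes on version B (the rewrite author's own statement) =====
-- stated objective: faster
-- what changed: B maintains running sums of both subsets incrementally instead of recomputing sum(s1) and sum(s2) from scratch on every iteration, turning the quadratic loop into a single linear pass.
import Mathlib
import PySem

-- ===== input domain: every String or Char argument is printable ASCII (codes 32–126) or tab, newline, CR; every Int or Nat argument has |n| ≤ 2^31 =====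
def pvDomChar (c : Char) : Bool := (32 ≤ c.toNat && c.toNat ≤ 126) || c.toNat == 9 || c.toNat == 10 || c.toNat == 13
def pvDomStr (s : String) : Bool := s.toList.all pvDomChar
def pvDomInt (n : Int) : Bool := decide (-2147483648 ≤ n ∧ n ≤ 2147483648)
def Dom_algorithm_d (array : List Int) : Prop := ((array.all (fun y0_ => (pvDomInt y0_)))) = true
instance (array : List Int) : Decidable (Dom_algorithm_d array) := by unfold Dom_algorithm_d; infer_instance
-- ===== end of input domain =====

-- B replaces A's per-iteration sum(s1)/sum(s2) recomputation by incrementally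
-- maintained running sums (one linear pass instead of a quadratic loop).

-- ===== PORT A =====
-- A: s1=[array[0]], s2=[array[1]]; for i in range(2,len): append array[i] to the
-- subset whose sum is currently not larger (ties to s1). The match on the first
-- two elements is array[0]/array[1]; len < 2 raises IndexError (outside Pre_).
def algorithm_d (array : List Int) : List Int × List Int :=
  match array with
  | a :: b :: _ =>
    (PySem.List.pyRange 2 (array.length : Int) 1).foldl
      (fun (st : List Int × List Int) i =>
        let x := PySem.List.pyGetD array i 0
        if st.1.sum ≤ st.2.sum then (st.1 ++ [x], st.2) else (st.1, st.2 ++ [x]))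
      ([a], [b])
  | _ => ([], [])

-- ===== PORT B =====
-- B: same greedy choice, but the comparison uses running totals t1, t2 updated
-- as elements are placed; the loop runs over array[2:] directly.
def algorithm_d_alt (array : List Int) : List Int × List Int :=
  match array with
  | [] => ([], [])
  | [_] => ([], [])
  | a :: b :: rest =>
    let r := rest.foldl
      (fun (st : (List Int × Int) × (List Int × Int)) x =>
        if st.1.2 ≤ st.2.2 then ((st.1.1 ++ [x], st.1.2 + x), st.2)
        else (st.1, (st.2.1 ++ [x], st.2.2 + x)))
      (([a], a), ([b], b))
    (r.1.1, r.2.1)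

-- ===== PRECONDITION & SPEC =====
-- Pre_ excludes only lists with fewer than 2 elements, on which A (array[0]/array[1]) raises IndexError.
def Pre_algorithm_d (array : List Int) : Prop := 2 ≤ array.length
instance (array : List Int) : Decidable (Pre_algorithm_d array) := by unfold Pre_algorithm_d; infer_instance
def pvWitness_algorithm_d : List Int := [3, 1, 4, 1, 5]
def Spec_algorithm_d (array : List Int) (out : List Int × List Int) : Prop := out = algorithm_d_alt array
instance (array : List Int) (out : List Int × List Int) : Decidable (Spec_algorithm_d array out) := by unfold Spec_algorithm_d; infer_instance

-- ===== CLAIM (what is proved, stated in full; the proofs are below) =====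
def Claim_equal_algorithm_d : Prop := ∀ (array : List Int), Dom_algorithm_d array → Pre_algorithm_d array → Spec_algorithm_d array (algorithm_d array)

-- ===== LEMMAS AND PROOFS =====

-- The two folds agree when B's running totals equal the sums of A's subsets.
theorem algorithm_d_fold_inv (l : List Int) :
    ∀ (s1 s2 : List Int),
    l.foldl
      (fun (st : (List Int × Int) × (List Int × Int)) x =>
        if st.1.2 ≤ st.2.2 then ((st.1.1 ++ [x], st.1.2 + x), st.2)
        else (st.1, (st.2.1 ++ [x], st.2.2 + x)))
      ((s1, s1.sum), (s2, s2.sum))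
    = (((l.foldl
          (fun (st : List Int × List Int) x =>
            if st.1.sum ≤ st.2.sum then (st.1 ++ [x], st.2) else (st.1, st.2 ++ [x]))
          (s1, s2)).1,
        (l.foldl
          (fun (st : List Int × List Int) x =>
            if st.1.sum ≤ st.2.sum then (st.1 ++ [x], st.2) else (st.1, st.2 ++ [x]))
          (s1, s2)).1.sum),
       ((l.foldl
          (fun (st : List Int × List Int) x =>
            if st.1.sum ≤ st.2.sum then (st.1 ++ [x], st.2) else (st.1, st.2 ++ [x]))
          (s1, s2)).2,
        (l.foldl
          (fun (st : List Int × List Int) x =>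
            if st.1.sum ≤ st.2.sum then (st.1 ++ [x], st.2) else (st.1, st.2 ++ [x]))
          (s1, s2)).2.sum)) := by
  induction l with
  | nil => intro s1 s2; rfl
  | cons x l ih =>
      intro s1 s2
      by_cases h : s1.sum ≤ s2.sum
      · simpa [List.foldl_cons, h] using ih (s1 ++ [x]) s2
      · simpa [List.foldl_cons, h] using ih s1 (s2 ++ [x])

-- ===== VERDICT (by name: the statement is the Claim_ definition above) =====
theorem algorithm_d_spec : Claim_equal_algorithm_d := by
  intro array _ hpre
  match array, hpre with
  | a :: b :: rest, _ =>
    show algorithm_d (a :: b :: rest) = algorithm_d_alt (a :: b :: rest)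
    simp only [algorithm_d, algorithm_d_alt]
    rw [PySem.List.foldl_pyRange_pyGetD' (a := 2) (xs := a :: b :: rest) (d := 0)
      (f := fun (st : List Int × List Int) x =>
        if st.1.sum ≤ st.2.sum then (st.1 ++ [x], st.2) else (st.1, st.2 ++ [x]))
      (init := ([a], [b])) (by norm_num)]
    have := algorithm_d_fold_inv ((a :: b :: rest).drop (2 : Int).toNat) [a] [b]
    simp at this ⊢
    rw [this]
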